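-- pv_equiv track=rewrite | github.com/Vangaren1/Leetcode-Practice | WeeklyContests/Split_And_Merge_Array_transformation/split__and__merge__array_transformation.py | minSplitMerge
-- ===== SOURCE A (Python) =====
-- from typing import Optional, List
-- from collections import defaultdict, deque
--
-- def minSplitMerge(nums1: List[int], nums2: List[int]) -> int:
--     n = len(nums1)
--     if n == 0:
--         return 0
--
--     # 1) For each value, queue the indices where it appears in num2 (left-to-right)
--     pos = defaultdict(deque)
--     for j, v in enumerate(nums2):
--         pos[v].append(j)
--
--     # 2) Map each element in num1 to its next target index in num2 → P
--     #    (This respects duplicate occurrences by consuming indices in order.)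
--     P = [
--         pos[v].popleft() for v in nums1
--     ]  # valid since num1 is a permutation of num2
--
--     # 3) Longest subsequence with consecutive-by-1 values (x, x+1, x+2, ...)
--     #    One-pass DP: best[v] = 1 + best[v-1] as we scan left→right.
--     best = {}
--     longest = 0
--     for x in P:
--         best[x] = best.get(x - 1, 0) + 1
--         if best[x] > longest:
--             longest = best[x]
--
--     # 4) Minimum moves = n - longest kept block
--     return n - longest
-- ===== SOURCE B (Python) =====
-- from typing import List
-- from collections import defaultdict, deque
--
-- def minSplitMerge(nums1: List[int], nums2: List[int]) -> int:
--     n = len(nums1)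
--     if n == 0:
--         return 0
--     # phases 1-2 as in the original: map each element of nums1 to its next
--     # unused index in nums2 (consuming duplicates left to right)
--     pos = defaultdict(deque)
--     for j, v in enumerate(nums2):
--         pos[v].append(j)
--     P = [pos[v].popleft() for v in nums1]
--     # phase 3 re-done: instead of scanning P with a chain-length dict, build the
--     # inverse position table once and SWEEP THE VALUE SPACE 0..len(nums2)-1,
--     # maintaining the current run of consecutive values at increasing positions.
--     idx = {x: i for i, x in enumerate(P)}
--     run = 0
--     longest = 0
--     for v in range(len(nums2)):
--         if v in idx:
--             run = run + 1 if (v - 1 in idx and idx[v - 1] < idx[v]) else 1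
--             if run > longest:
--                 longest = run
--     return n - longest
-- ===== Notes on version B (the rewrite author's own statement) =====
-- stated objective: alternative
-- what changed: Phase 3 is re-decomposed: instead of scanning P left-to-right while growing a chain-length dict keyed by values, B builds the inverse position table of P once and sweeps the value space 0..len(nums2)-1, tracking the current run of consecutive values with increasing positions.
import Mathlib
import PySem

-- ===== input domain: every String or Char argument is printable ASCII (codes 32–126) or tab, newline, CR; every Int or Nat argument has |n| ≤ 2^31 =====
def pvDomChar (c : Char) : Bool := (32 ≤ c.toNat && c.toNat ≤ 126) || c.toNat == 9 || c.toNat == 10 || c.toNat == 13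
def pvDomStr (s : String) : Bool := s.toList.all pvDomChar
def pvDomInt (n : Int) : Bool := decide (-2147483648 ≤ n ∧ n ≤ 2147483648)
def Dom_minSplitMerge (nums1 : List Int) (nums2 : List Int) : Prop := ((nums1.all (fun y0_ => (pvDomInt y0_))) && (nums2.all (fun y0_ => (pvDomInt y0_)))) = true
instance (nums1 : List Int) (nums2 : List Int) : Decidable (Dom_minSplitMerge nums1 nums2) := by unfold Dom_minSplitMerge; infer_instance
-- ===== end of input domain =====

-- B re-does phase 3 only: instead of A's left-to-right scan of P with a chain-length dict,
-- it builds the inverse position table of P once and sweeps the value space 0..len(nums2)-1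
-- tracking the current consecutive run; same return value (alternative decomposition, no speed claim).

-- ===== PORT A =====
-- phases 1-2, shared verbatim by both Python versions: pos = defaultdict(deque) of indices,
-- then P = [pos[v].popleft() for v in nums1]; `none` = the IndexError of popleft on an empty deque.
def pvBuildPos (nums2 : List Int) : PySem.Dict Int (List Int) :=
  (PySem.List.enumerate nums2 0).foldl (fun d p => d.modify p.2 [] (fun q => q ++ [p.1])) PySem.Dict.empty

def pvPopAll (d : PySem.Dict Int (List Int)) : List Int → Option (List Int)
  | [] => some []
  | v :: vs =>
    match d.getD v [] with
    | [] => none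
    | j :: t => (pvPopAll (d.insert v t) vs).map (fun rest => j :: rest)

def minSplitMerge (nums1 : List Int) (nums2 : List Int) : Int :=
  let n := nums1.length
  if n = 0 then 0 else
    match pvPopAll (pvBuildPos nums2) nums1 with
    | none => 0   -- Python raises IndexError here; excluded by Pre_minSplitMerge
    | some P =>
      -- best = {}; for x in P: best[x] = best.get(x-1, 0) + 1; longest = running max
      let st := P.foldl (fun (st : PySem.Dict Int Int × Int) x =>
        let b := st.1.getD (x - 1) 0 + 1
        (st.1.insert x b, if b > st.2 then b else st.2)) (PySem.Dict.empty, 0)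
      (n : Int) - st.2

-- ===== PORT B =====
def minSplitMerge_alt (nums1 : List Int) (nums2 : List Int) : Int :=
  let n := nums1.length
  if n = 0 then 0 else
    match pvPopAll (pvBuildPos nums2) nums1 with
    | none => 0   -- Python raises IndexError here; excluded by Pre_minSplitMerge
    | some P =>
      -- idx = {x: i for i, x in enumerate(P)}
      let idx := (PySem.List.enumerate P 0).foldl (fun d p => d.insert p.2 p.1) PySem.Dict.empty
      -- sweep the value space: for v in range(len(nums2)): ...
      let st := (PySem.List.pyRange 0 (nums2.length : Int) 1).foldl (fun (st : Int × Int) v =>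
        if idx.contains v then
          -- the two idx[...] accesses are guarded by `contains`, so getD never sees its default
          let r := if idx.contains (v - 1) && decide (idx.getD (v - 1) 0 < idx.getD v 0) then st.1 + 1 else 1
          (r, if r > st.2 then r else st.2)
        else st) (0, 0)
      (n : Int) - st.2

-- ===== PRECONDITION & SPEC =====
-- Pre_ excludes exactly the inputs where the comprehension's popleft raises IndexError in
-- both Python versions: some value occurs more often in nums1 than in nums2.
def Pre_minSplitMerge (nums1 : List Int) (nums2 : List Int) : Prop :=
  ∀ v ∈ nums1, nums1.count v ≤ nums2.count v
instance (nums1 : List Int) (nums2 : List Int) : Decidable (Pre_minSplitMerge nums1 nums2) := by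
  unfold Pre_minSplitMerge; infer_instance
def pvWitness_minSplitMerge : List Int × List Int := ([1, 0, 2], [2, 0, 1])

def Spec_minSplitMerge (nums1 : List Int) (nums2 : List Int) (out : Int) : Prop := out = minSplitMerge_alt nums1 nums2
instance (nums1 : List Int) (nums2 : List Int) (out : Int) : Decidable (Spec_minSplitMerge nums1 nums2 out) := by unfold Spec_minSplitMerge; infer_instance

-- ===== CLAIM (what is proved, stated in full; the proofs are below) =====
def Claim_equal_minSplitMerge : Prop := ∀ (nums1 : List Int) (nums2 : List Int), Dom_minSplitMerge nums1 nums2 → Pre_minSplitMerge nums1 nums2 → Spec_minSplitMerge nums1 nums2 (minSplitMerge nums1 nums2)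

-- ===== LEMMAS AND PROOFS =====

-- chain length ending at position i of P: 1 + chain at the (unique) position of P[i]-1 if that
-- position is earlier, else 1 (the reference both loops are proved against)
def pvChainAt (P : List Int) (i : Nat) : Nat :=
  match P.findIdx? (fun z => z == P.getD i 0 - 1) with
  | some j => if h : j < i then pvChainAt P j + 1 else 1
  | none => 1
termination_by i
decreasing_by exact h

-- invariant of the pos dict: every queue is duplicate-free and holds in-range indices of nums2
-- whose element is the queue's key
def PvPosInv (nums2 : List Int) (d : PySem.Dict Int (List Int)) : Prop :=
  ∀ v : Int, (d.getD v []).Nodup ∧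
    ∀ j ∈ d.getD v [], ∃ k : Nat, j = (k : Int) ∧ k < nums2.length ∧ nums2.getD k 0 = v

theorem pvBuildPos_getD (nums2 : List Int) (v : Int) :
    (pvBuildPos nums2).getD v [] =
      ((PySem.List.enumerate nums2 0).filter (fun p => p.2 == v)).map (fun p => p.1) := by
  unfold pvBuildPos
  have h := PySem.Dict.getD_foldl_modify_append
    ((PySem.List.enumerate nums2 0).map Prod.swap) (PySem.Dict.empty (κ := Int) (ν := List Int)) v
  rw [List.foldl_map] at h
  simp only [Prod.fst_swap, Prod.snd_swap] at h
  rw [h, List.filter_map, List.map_map]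
  simp [PySem.Dict.getD_empty, Function.comp_def]

theorem pvBuildPos_inv (nums2 : List Int) : PvPosInv nums2 (pvBuildPos nums2) := by
  intro v
  rw [pvBuildPos_getD]
  constructor
  · have hp := (PySem.List.pairwise_lt_enumerate nums2 0).filter (fun p => p.2 == v)
    have : (((PySem.List.enumerate nums2 0).filter (fun p => p.2 == v)).map (fun p => p.1)).Pairwise (· < ·) := by
      rw [List.pairwise_map]; exact hp
    exact this.imp (fun h => ne_of_lt h)
  · intro j hj
    rcases List.mem_map.mp hj with ⟨p, hpmem, hpj⟩
    rcases List.mem_filter.mp hpmem with ⟨hpe, hpv⟩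
    rcases (PySem.List.mem_enumerate_iff nums2 0 p).mp hpe with ⟨k, hk, hpk⟩
    refine ⟨k, ?_, hk, ?_⟩
    · rw [← hpj, hpk]; simp
    · have : p.2 = v := by simpa using hpv
      rw [List.getD_eq_getElem _ _ hk, ← this, hpk]

theorem pvPopAll_facts (nums2 : List Int) :
    ∀ (vs : List Int) (d : PySem.Dict Int (List Int)) (P : List Int),
    PvPosInv nums2 d → pvPopAll d vs = some P →
    P.Nodup ∧ (∀ x ∈ P, ∃ k : Nat, x = (k : Int) ∧ k < nums2.length) ∧
      (∀ x ∈ P, ∃ v, x ∈ d.getD v []) := by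
  intro vs
  induction vs with
  | nil =>
    intro d P _ h
    simp only [pvPopAll] at h
    cases h
    exact ⟨List.nodup_nil, by simp, by simp⟩
  | cons v vs ih =>
    intro d P hinv h
    simp only [pvPopAll] at h
    rcases hq : d.getD v [] with _ | ⟨j, t⟩
    · rw [hq] at h; cases h
    · rw [hq] at h
      rcases Option.map_eq_some_iff.mp h with ⟨P', hP', rfl⟩
      have hinv' : PvPosInv nums2 (d.insert v t) := by
        intro w
        rw [PySem.Dict.getD_insert]
        split_ifs with hw
        · have := hinv v
          rw [hq] at this
          exact ⟨this.1.of_cons, fun x hx => (hw ▸ this.2) x (List.mem_cons_of_mem _ hx)⟩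
        · exact hinv w
      rcases ih (d.insert v t) P' hinv' hP' with ⟨hnd, hbnd, hmem⟩
      have hjq : j ∈ d.getD v [] := by rw [hq]; exact List.mem_cons_self
      have hjnotP' : j ∉ P' := by
        intro hjP'
        rcases hmem j hjP' with ⟨w, hw⟩
        rw [PySem.Dict.getD_insert] at hw
        by_cases hwv : w = v
        · rw [if_pos hwv] at hw
          have := hinv v
          rw [hq] at this
          exact (List.nodup_cons.mp this.1).1 hw
        · rw [if_neg hwv] at hw
          rcases (hinv v).2 j hjq with ⟨k, hk1, _, hk3⟩
          rcases (hinv w).2 j hw with ⟨k', hk1', _, hk3'⟩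
          have : k = k' := by omega
          exact hwv (by rw [← hk3', ← this, hk3])
      refine ⟨List.nodup_cons.mpr ⟨hjnotP', hnd⟩, ?_, ?_⟩
      · intro x hx
        rcases List.mem_cons.mp hx with rfl | hx'
        · rcases (hinv v).2 x hjq with ⟨k, hk1, hk2, _⟩
          exact ⟨k, hk1, hk2⟩
        · exact hbnd x hx'
      · intro x hx
        rcases List.mem_cons.mp hx with rfl | hx'
        · exact ⟨v, hjq⟩
        · rcases hmem x hx' with ⟨w, hw⟩
          rw [PySem.Dict.getD_insert] at hw
          by_cases hwv : w = v
          · rw [if_pos hwv] at hw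
            exact ⟨v, by rw [hq]; exact List.mem_cons_of_mem _ hw⟩
          · rw [if_neg hwv] at hw
            exact ⟨w, hw⟩

theorem pvFindIdx_self (P : List Int) (hnd : P.Nodup) (k : Nat) (hk : k < P.length) :
    P.findIdx? (fun z => z == P[k]) = some k := by
  rw [List.findIdx?_eq_some_iff_getElem]
  refine ⟨hk, by simp, ?_⟩
  intro j hj
  simp only [beq_iff_eq]
  intro hEq
  have := (hnd.getElem_inj_iff (hi := Nat.lt_trans hj hk) (hj := hk)).mp hEq
  omega

theorem pvIdxFold (P : List Int) (hnd : P.Nodup) :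
    ∀ (s : Int) (d : PySem.Dict Int Int) (y : Int),
    ((PySem.List.enumerate P s).foldl (fun d p => d.insert p.2 p.1) d).get? y =
      match P.findIdx? (fun z => z == y) with
      | some i => some (s + (i : Int))
      | none => d.get? y := by
  induction P with
  | nil => intro s d y; simp [PySem.List.enumerate_nil]
  | cons x xs ih =>
    intro s d y
    rw [PySem.List.enumerate_cons, List.foldl_cons]
    rw [ih (List.Nodup.of_cons hnd) (s + 1) (d.insert x s) y]
    rw [List.findIdx?_cons]
    by_cases hxy : x = y
    · subst hxy
      have hnone : xs.findIdx? (fun z => z == x) = none := by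
        rw [List.findIdx?_eq_none_iff]
        intro z hz
        simp only [beq_eq_false_iff_ne, ne_eq]
        intro rfl'
        exact (List.nodup_cons.mp hnd).1 (rfl' ▸ hz)
      rw [hnone]
      simp
    · simp only [beq_iff_eq, hxy, if_false]
      rcases hf : xs.findIdx? (fun z => z == y) with _ | i
      · simp [PySem.Dict.get?_insert, Ne.symm hxy]
      · simp only [Option.map_some]
        push_cast
        ring_nf

theorem pvAloop (P : List Int) (hnd : P.Nodup) :
    ∀ k : Nat, k ≤ P.length →
    (∀ y : Int, ((P.take k).foldl (fun (st : PySem.Dict Int Int × Int) x =>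
        let b := st.1.getD (x - 1) 0 + 1
        (st.1.insert x b, if b > st.2 then b else st.2)) (PySem.Dict.empty, 0)).1.get? y =
      (match P.findIdx? (fun z => z == y) with
       | some i => if i < k then some ((pvChainAt P i : Nat) : Int) else none
       | none => none)) ∧
    ((P.take k).foldl (fun (st : PySem.Dict Int Int × Int) x =>
        let b := st.1.getD (x - 1) 0 + 1
        (st.1.insert x b, if b > st.2 then b else st.2)) (PySem.Dict.empty, 0)).2 =
      (((Finset.range k).sup (pvChainAt P) : Nat) : Int) := by
  intro k
  induction k with
  | zero =>
    intro _
    refine ⟨fun y => ?_, by simp⟩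
    rcases hf : P.findIdx? (fun z => z == y) with _ | i <;> simp [PySem.Dict.get?_empty]
  | succ k ih =>
    intro hk1
    have hk : k < P.length := by omega
    rcases ih (by omega) with ⟨hget, hlong⟩
    rw [List.take_add_one, List.getElem?_eq_getElem hk]
    simp only [Option.toList_some, List.foldl_append, List.foldl_cons, List.foldl_nil]
    set st := ((P.take k).foldl (fun (st : PySem.Dict Int Int × Int) x =>
        let b := st.1.getD (x - 1) 0 + 1
        (st.1.insert x b, if b > st.2 then b else st.2)) (PySem.Dict.empty, 0)) with hst
    have hgd : P.getD k 0 = P[k] := List.getD_eq_getElem P 0 hk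
    have hb : st.1.getD (P[k] - 1) 0 + 1 = ((pvChainAt P k : Nat) : Int) := by
      rw [PySem.Dict.getD_eq_get?_getD, hget (P[k] - 1)]
      rcases hf : P.findIdx? (fun z => z == P[k] - 1) with _ | j
      · rw [pvChainAt, hgd, hf]; simp
      · by_cases hjk : j < k
        · rw [pvChainAt, hgd, hf]
          simp [hjk]
        · rw [pvChainAt, hgd, hf]
          simp [hjk]
    constructor
    · intro y
      show (st.1.insert P[k] (st.1.getD (P[k] - 1) 0 + 1)).get? y = _
      rw [hb, PySem.Dict.get?_insert]
      by_cases hyx : y = P[k]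
      · subst hyx
        rw [if_pos rfl, pvFindIdx_self P hnd k hk]
        simp
      · rw [if_neg hyx, hget y]
        rcases hf : P.findIdx? (fun z => z == y) with _ | i
        · rfl
        · have hik : i ≠ k := by
            rcases List.findIdx?_eq_some_iff_getElem.mp hf with ⟨hi, hpi, _⟩
            intro h; subst h
            have hpik : P[i] = y := by simpa using hpi
            exact hyx hpik.symm
          have hiff : i < k ↔ i < k + 1 := by omega
          simp [hiff]
    · show (if st.1.getD (P[k] - 1) 0 + 1 > st.2 then st.1.getD (P[k] - 1) 0 + 1 else st.2) = _
      rw [hb, hlong, Finset.range_add_one, Finset.sup_insert]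
      have : (pvChainAt P k ⊔ (Finset.range k).sup (pvChainAt P)) = max (pvChainAt P k) ((Finset.range k).sup (pvChainAt P)) := rfl
      rw [this]
      push_cast
      rw [max_def]
      split_ifs <;> omega

theorem pvBloop (P : List Int) (hnd : P.Nodup)
    (hb : ∀ x ∈ P, ∃ k : Nat, x = (k : Int)) :
    ∀ V : Nat,
    (∀ j : Nat, (hj : j < P.length) → P[j] = (V : Int) - 1 →
      ((PySem.List.pyRange 0 (V : Int) 1).foldl (fun (st : Int × Int) v =>
        if ((PySem.List.enumerate P 0).foldl (fun d p => d.insert p.2 p.1) PySem.Dict.empty).contains v then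
          let r := if ((PySem.List.enumerate P 0).foldl (fun d p => d.insert p.2 p.1) PySem.Dict.empty).contains (v - 1) && decide (((PySem.List.enumerate P 0).foldl (fun d p => d.insert p.2 p.1) PySem.Dict.empty).getD (v - 1) 0 < ((PySem.List.enumerate P 0).foldl (fun d p => d.insert p.2 p.1) PySem.Dict.empty).getD v 0) then st.1 + 1 else 1
          (r, if r > st.2 then r else st.2)
        else st) (0, 0)).1 = ((pvChainAt P j : Nat) : Int)) ∧
    ((PySem.List.pyRange 0 (V : Int) 1).foldl (fun (st : Int × Int) v =>
        if ((PySem.List.enumerate P 0).foldl (fun d p => d.insert p.2 p.1) PySem.Dict.empty).contains v then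
          let r := if ((PySem.List.enumerate P 0).foldl (fun d p => d.insert p.2 p.1) PySem.Dict.empty).contains (v - 1) && decide (((PySem.List.enumerate P 0).foldl (fun d p => d.insert p.2 p.1) PySem.Dict.empty).getD (v - 1) 0 < ((PySem.List.enumerate P 0).foldl (fun d p => d.insert p.2 p.1) PySem.Dict.empty).getD v 0) then st.1 + 1 else 1
          (r, if r > st.2 then r else st.2)
        else st) (0, 0)).2 =
      (((Finset.range P.length).filter (fun i => P.getD i 0 < (V : Int))).sup (pvChainAt P) : Nat) := by
  set idx := (PySem.List.enumerate P 0).foldl (fun d p => d.insert p.2 p.1) PySem.Dict.empty with hidx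
  have hget : ∀ y : Int, idx.get? y =
      (match P.findIdx? (fun z => z == y) with
       | some i => some ((i : Nat) : Int)
       | none => none) := by
    intro y
    rw [hidx, pvIdxFold P hnd 0 PySem.Dict.empty y]
    rcases hf : P.findIdx? (fun z => z == y) with _ | i
    · simp [PySem.Dict.get?_empty]
    · norm_num
  have hcont : ∀ y : Int, idx.contains y = (P.findIdx? (fun z => z == y)).isSome := by
    intro y
    rw [PySem.Dict.contains_eq_isSome_get?, hget y]
    rcases hf : P.findIdx? (fun z => z == y) with _ | i <;> simp
  intro V
  induction V with
  | zero =>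
    constructor
    · intro j hj hPj
      rcases hb P[j] (List.getElem_mem hj) with ⟨k, hk⟩
      omega
    · have hempty : (Finset.range P.length).filter (fun i => P.getD i 0 < ((0 : Nat) : Int)) = ∅ := by
        apply Finset.filter_false_of_mem
        intro i hi
        have hi' : i < P.length := Finset.mem_range.mp hi
        rw [List.getD_eq_getElem P 0 hi']
        rcases hb (P[i]'hi') (List.getElem_mem hi') with ⟨k, hk⟩
        omega
      rw [hempty]
      simp [PySem.List.pyRange]
  | succ V ih =>
    rcases ih with ⟨ihrun, ihlong⟩
    have hcast : (((V + 1 : Nat)) : Int) = (V : Int) + 1 := by push_cast; ring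
    rw [hcast, PySem.List.pyRange_one_succ_right (by positivity)]
    rw [List.foldl_append, List.foldl_cons, List.foldl_nil]
    set st := ((PySem.List.pyRange 0 (V : Int) 1).foldl (fun (st : Int × Int) v =>
        if idx.contains v then
          let r := if idx.contains (v - 1) && decide (idx.getD (v - 1) 0 < idx.getD v 0) then st.1 + 1 else 1
          (r, if r > st.2 then r else st.2)
        else st) (0, 0)) with hst
    by_cases hV : ∃ (j0 : Nat) (h : j0 < P.length), P[j0] = (V : Int)
    · rcases hV with ⟨j0, hj0, hP0⟩
      have hfV : P.findIdx? (fun z => z == (V : Int)) = some j0 := by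
        have := pvFindIdx_self P hnd j0 hj0
        rwa [hP0] at this
      have hcV : idx.contains (V : Int) = true := by rw [hcont, hfV]; rfl
      have hgV : idx.getD (V : Int) 0 = (j0 : Int) := by
        rw [PySem.Dict.getD_eq_get?_getD, hget, hfV]; rfl
      have hgdj0 : P.getD j0 0 = (V : Int) := by rw [List.getD_eq_getElem P 0 hj0, hP0]
      -- the new run value equals the chain length at j0
      have hrun' : (if idx.contains ((V : Int) - 1) && decide (idx.getD ((V : Int) - 1) 0 < idx.getD (V : Int) 0) then st.1 + 1 else 1)
          = ((pvChainAt P j0 : Nat) : Int) := by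
        rcases hf1 : P.findIdx? (fun z => z == (V : Int) - 1) with _ | j1
        · have hc1 : idx.contains ((V : Int) - 1) = false := by rw [hcont, hf1]; rfl
          rw [hc1]
          rw [pvChainAt, hgdj0, hf1]
          simp
        · have hc1 : idx.contains ((V : Int) - 1) = true := by rw [hcont, hf1]; rfl
          have hg1 : idx.getD ((V : Int) - 1) 0 = (j1 : Int) := by
            rw [PySem.Dict.getD_eq_get?_getD, hget, hf1]; rfl
          rcases List.findIdx?_eq_some_iff_getElem.mp hf1 with ⟨hj1, hpj1, _⟩
          have hPj1 : P[j1] = (V : Int) - 1 := by simpa using hpj1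
          rw [hc1, hg1, hgV]
          by_cases hlt : j1 < j0
          · have hdec : decide ((j1 : Int) < (j0 : Int)) = true := by simp [hlt]
            rw [hdec]
            simp only [Bool.and_self, if_true]
            have hcj0 : pvChainAt P j0 = pvChainAt P j1 + 1 := by
              rw [pvChainAt, hgdj0, hf1]; simp [hlt]
            rw [ihrun j1 hj1 hPj1, hcj0]
            push_cast; ring
          · have hdec : decide ((j1 : Int) < (j0 : Int)) = false := by simp; omega
            rw [hdec]
            simp only [Bool.and_false]
            have hcj0 : pvChainAt P j0 = 1 := by
              rw [pvChainAt, hgdj0, hf1]; simp [hlt]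
            rw [hcj0]
            simp
      rw [hcV]
      simp only [if_true]
      constructor
      · intro j hj hPj
        have hPjV : P[j] = (V : Int) := by omega
        have : j = j0 := (hnd.getElem_inj_iff (hi := hj) (hj := hj0)).mp (by rw [hPjV, hP0])
        subst this
        show (if idx.contains ((V : Int) - 1) && decide (idx.getD ((V : Int) - 1) 0 < idx.getD (V : Int) 0) then st.1 + 1 else 1) = _
        rw [hrun']
      · show (let r := if idx.contains ((V : Int) - 1) && decide (idx.getD ((V : Int) - 1) 0 < idx.getD (V : Int) 0) then st.1 + 1 else 1
              (r, if r > st.2 then r else st.2)).2 = _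
        simp only
        rw [hrun', ihlong]
        have hins : (Finset.range P.length).filter (fun i => P.getD i 0 < (V : Int) + 1) =
            insert j0 ((Finset.range P.length).filter (fun i => P.getD i 0 < (V : Int))) := by
          ext i
          simp only [Finset.mem_filter, Finset.mem_insert, Finset.mem_range]
          constructor
          · rintro ⟨hi, hlt⟩
            by_cases hEqV : P.getD i 0 = (V : Int)
            · left
              have : P[i] = P[j0] := by
                rw [← List.getD_eq_getElem P 0 hi, hEqV, hP0]
              exact (hnd.getElem_inj_iff (hi := hi) (hj := hj0)).mp this
            · right; exact ⟨hi, by omega⟩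
          · rintro (rfl | ⟨hi, hlt⟩)
            · exact ⟨hj0, by rw [hgdj0]; omega⟩
            · exact ⟨hi, by omega⟩
        rw [hins, Finset.sup_insert]
        have hmax : (pvChainAt P j0 ⊔ ((Finset.range P.length).filter (fun i => P.getD i 0 < (V : Int))).sup (pvChainAt P))
            = max (pvChainAt P j0) (((Finset.range P.length).filter (fun i => P.getD i 0 < (V : Int))).sup (pvChainAt P)) := rfl
        rw [hmax]
        push_cast
        rw [max_def]
        split_ifs <;> omega
    · have hfV : P.findIdx? (fun z => z == (V : Int)) = none := by
        rw [List.findIdx?_eq_none_iff]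
        intro x hx
        rcases List.mem_iff_getElem.mp hx with ⟨i, hi, rfl⟩
        simp only [beq_eq_false_iff_ne, ne_eq]
        intro h
        exact hV ⟨i, hi, h⟩
      have hcV : idx.contains (V : Int) = false := by rw [hcont, hfV]; rfl
      rw [hcV]
      simp only [Bool.false_eq_true, if_false]
      constructor
      · intro j hj hPj
        exact absurd ⟨j, hj, by omega⟩ hV
      · rw [ihlong]
        have hsame : (Finset.range P.length).filter (fun i => P.getD i 0 < (V : Int) + 1) =
            (Finset.range P.length).filter (fun i => P.getD i 0 < (V : Int)) := by
          ext i
          simp only [Finset.mem_filter, Finset.mem_range]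
          constructor
          · rintro ⟨hi, hlt⟩
            refine ⟨hi, ?_⟩
            have hne : P.getD i 0 ≠ (V : Int) := by
              rw [List.getD_eq_getElem P 0 hi]
              intro h
              exact hV ⟨i, hi, h⟩
            omega
          · rintro ⟨hi, hlt⟩
            exact ⟨hi, by omega⟩
        rw [hsame]

-- ===== VERDICT (by name: the statement is the Claim_ definition above) =====
theorem minSplitMerge_spec : Claim_equal_minSplitMerge := by
  intro nums1 nums2 _ _
  show minSplitMerge nums1 nums2 = minSplitMerge_alt nums1 nums2
  simp only [minSplitMerge, minSplitMerge_alt]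
  by_cases h0 : nums1.length = 0
  · simp [h0]
  · rw [if_neg h0, if_neg h0]
    rcases hP : pvPopAll (pvBuildPos nums2) nums1 with _ | P
    · rfl
    · obtain ⟨hnd, hbnd, -⟩ :=
        pvPopAll_facts nums2 nums1 (pvBuildPos nums2) P (pvBuildPos_inv nums2) hP
      have ha := (pvAloop P hnd P.length le_rfl).2
      rw [List.take_length] at ha
      have hb' : ∀ x ∈ P, ∃ k : Nat, x = (k : Int) := by
        intro x hx; rcases hbnd x hx with ⟨k, hk, _⟩; exact ⟨k, hk⟩
      have hbl := (pvBloop P hnd hb' nums2.length).2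
      have hfull : (Finset.range P.length).filter (fun i => P.getD i 0 < ((nums2.length : Nat) : Int)) =
          Finset.range P.length := by
        apply Finset.filter_true_of_mem
        intro i hi
        have hi' : i < P.length := Finset.mem_range.mp hi
        rw [List.getD_eq_getElem P 0 hi']
        rcases hbnd (P[i]'hi') (List.getElem_mem hi') with ⟨k, hk1, hk2⟩
        omega
      rw [hfull] at hbl
      dsimp only at ha hbl ⊢
      rw [ha, hbl]
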